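-- pv_equiv track=rewrite | github.com/miruts-xz/competitive-programming | contests/contest-9/F.py | solve
-- ===== SOURCE A (Python) =====
-- def solve(bosses):
--     n = len(bosses)
--     count = bosses[0]
--     prefix = [0]*n
--     for i in range(1, n):
--         prefix[i] = prefix[i-1]+bosses[i]
--     l, r = 0, 3
--     while r < len(prefix):
--         if prefix[r]-prefix[l] == 3:
--             count += 1
--             l, r = r-1, r + 2
--         l, r = l+1, r+1
--     return count
-- ===== SOURCE B (Python) =====
-- def solve(bosses):
--     # One forward pass with a 3-element sliding buffer; no prefix-sum table, no index arithmetic.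
--     count = bosses[0]
--     buf = []
--     for z in bosses[1:]:
--         buf.append(z)
--         if len(buf) == 3:
--             if buf[0] + buf[1] + buf[2] == 3:
--                 count += 1
--                 buf = []
--             else:
--                 del buf[0]
--     return count
-- ===== Notes on version B (the rewrite author's own statement) =====
-- stated objective: simpler
-- what changed: Replaced the prefix-sum table plus two-index (l,r) window scan by a single forward pass over bosses[1:] that maintains a 3-element sliding buffer, summing the buffer directly instead of taking prefix differences.
import Mathlib
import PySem

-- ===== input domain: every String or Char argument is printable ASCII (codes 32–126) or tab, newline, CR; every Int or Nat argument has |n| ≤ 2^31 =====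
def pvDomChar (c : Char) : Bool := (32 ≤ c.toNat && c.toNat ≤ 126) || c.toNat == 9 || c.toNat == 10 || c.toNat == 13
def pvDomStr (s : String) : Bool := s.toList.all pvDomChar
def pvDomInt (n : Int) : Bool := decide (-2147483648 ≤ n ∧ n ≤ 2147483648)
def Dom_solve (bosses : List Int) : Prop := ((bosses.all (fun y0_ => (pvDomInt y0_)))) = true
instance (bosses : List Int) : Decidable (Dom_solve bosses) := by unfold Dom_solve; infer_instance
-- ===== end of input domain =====

-- B replaces A's pfx-sum table and (l,r) window scan by one forward pass with a
-- 3-element sliding buffer (objective: simpler, O(1) extra space).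


-- ===== PORT A =====
-- the while loop: `l, r` kept as Int; inside the loop 0 ≤ l < r < pfx.length always
-- holds, so `pyGetD … 0` reads exactly the cell Python reads.
def solveLoopA (pfx : List Int) (count l r : Int) : Int :=
  if _h : r < (pfx.length : Int) then
    if PySem.List.pyGetD pfx r 0 - PySem.List.pyGetD pfx l 0 = 3 then
      solveLoopA pfx (count + 1) ((r - 1) + 1) ((r + 2) + 1)
    else
      solveLoopA pfx count (l + 1) (r + 1)
  else count
termination_by ((pfx.length : Int) - r).toNat
decreasing_by all_goals (simp at *; omega)

def solve (bosses : List Int) : Int :=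
  match bosses with
  | [] => 0    -- the first-element read raises IndexError here; excluded by Pre_solve
  | _ :: _ =>
    let n : Int := bosses.length
    let count := PySem.List.pyGetD bosses 0 0
    let pfx :=
      (PySem.List.pyRange 1 n 1).foldl
        (fun p i =>
          PySem.List.pySetD p i
            (PySem.List.pyGetD p (i - 1) 0 + PySem.List.pyGetD bosses i 0))
        (List.replicate n.toNat 0)
    solveLoopA pfx count 0 3

-- ===== PORT B =====
def stepB (s : Int × List Int) (z : Int) : Int × List Int :=
  let buf := s.2 ++ [z]
  if buf.length = 3 then
    if PySem.List.pyGetD buf 0 0 + PySem.List.pyGetD buf 1 0 + PySem.List.pyGetD buf 2 0 = 3 then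
      (s.1 + 1, [])
    else
      (s.1, buf.drop 1)     -- del buf[0]
  else (s.1, buf)

def solve_alt (bosses : List Int) : Int :=
  match bosses with
  | [] => 0    -- the first-element read raises IndexError here; excluded by Pre_solve
  | _ :: _ =>
    ((PySem.List.slice bosses (some 1) none).foldl stepB (PySem.List.pyGetD bosses 0 0, [])).1

-- ===== PRECONDITION & SPEC =====
-- Python A reads the first element, which raises IndexError on the empty list.
def Pre_solve (bosses : List Int) : Prop := bosses ≠ []
instance (bosses : List Int) : Decidable (Pre_solve bosses) := by unfold Pre_solve; infer_instance
def pvWitness_solve : List Int := [1, 1, 1, 1]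

def Spec_solve (bosses : List Int) (out : Int) : Prop := out = solve_alt bosses
instance (bosses : List Int) (out : Int) : Decidable (Spec_solve bosses out) := by unfold Spec_solve; infer_instance

-- ===== CLAIM (what is proved, stated in full; the proofs are below) =====
def Claim_equal_solve : Prop := ∀ (bosses : List Int), Dom_solve bosses → Pre_solve bosses → Spec_solve bosses (solve bosses)

-- ===== LEMMAS AND PROOFS =====

-- reference count: scan the tail, consuming 3 on a match and 1 otherwise
def ctr : List Int → Int
  | a :: b :: c :: rest => if a + b + c = 3 then 1 + ctr rest else ctr (b :: c :: rest)
  | _ => 0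
termination_by xs => xs.length

theorem ctr_short (xs : List Int) (h : xs.length ≤ 2) : ctr xs = 0 := by
  match xs with
  | [] => simp [ctr]
  | [_] => simp [ctr]
  | [_, _] => simp [ctr]
  | _ :: _ :: _ :: _ => simp at h

-- B side: the fold with a short buffer computes ctr of the remaining input
theorem foldB (t : List Int) : ∀ (count : Int) (buf : List Int), buf.length ≤ 2 →
    (t.foldl stepB (count, buf)).1 = count + ctr (buf ++ t) := by
  induction t with
  | nil =>
    intro count buf h
    simp [ctr_short buf h]
  | cons z t ih =>
    intro count buf h
    match buf with
    | [] =>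
      simpa [List.foldl_cons, stepB] using ih count [z] (by simp)
    | [a] =>
      simpa [List.foldl_cons, stepB] using ih count [a, z] (by simp)
    | [a, b] =>
      have hg : stepB (count, [a, b]) z =
          (if a + b + z = 3 then (count + 1, ([] : List Int)) else (count, [b, z])) := by
        simp [stepB, PySem.List.pyGetD]
      have hc : ctr ([a, b] ++ z :: t) = if a + b + z = 3 then 1 + ctr t else ctr ([b, z] ++ t) := by
        show ctr (a :: b :: z :: t) = _
        rw [ctr]
        rfl
      by_cases hm : a + b + z = 3
      · rw [List.foldl_cons, hg, if_pos hm, ih (count + 1) [] (by simp), hc, if_pos hm]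
        simp; ring
      · rw [List.foldl_cons, hg, if_neg hm, ih count [b, z] (by simp), hc, if_neg hm]
    | _ :: _ :: _ :: _ => simp at h

theorem solve_alt_eq (x : Int) (t : List Int) : solve_alt (x :: t) = x + ctr t := by
  simp [solve_alt, PySem.List.slice_from_one, PySem.List.pyGetD]
  simpa using foldB t x [] (by simp)

-- A side -----------------------------------------------------------------
-- pfx sums of the tail
def pref (t : List Int) (i : Nat) : Int := (t.take i).sum

-- the array-fill loop produces exactly the prefix sums
theorem prefix_fill (x : Int) (t : List Int) : ∀ (j : Nat), j ≤ t.length + 1 → 1 ≤ j →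
    (PySem.List.pyRange 1 (j : Int) 1).foldl
        (fun p i =>
          PySem.List.pySetD p i
            (PySem.List.pyGetD p (i - 1) 0 + PySem.List.pyGetD (x :: t) i 0))
        (List.replicate (t.length + 1) 0)
      = (List.range (t.length + 1)).map (fun i => if i < j then pref t i else 0) := by
  intro j
  induction j with
  | zero => omega
  | succ j ih =>
    intro hle _
    by_cases hj : 1 ≤ j
    · have hrange : PySem.List.pyRange 1 ((j + 1 : Nat) : Int) 1
          = PySem.List.pyRange 1 (j : Nat) 1 ++ [(j : Int)] := by
        push_cast
        exact PySem.List.pyRange_one_succ_right (by exact_mod_cast hj)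
      rw [hrange, List.foldl_append, ih (by omega) hj]
      simp only [List.foldl_cons, List.foldl_nil]
      have hj1 : ((j : Int) - 1) = ((j - 1 : Nat) : Int) := by omega
      have hgp : PySem.List.pyGetD
          ((List.range (t.length + 1)).map (fun i => if i < j then pref t i else 0)) ((j : Int) - 1) 0
          = pref t (j - 1) := by
        rw [hj1, PySem.List.pyGetD_natCast]
        rw [List.getD_eq_getElem _ _ (by simp; omega)]
        simp only [List.getElem_map, List.getElem_range]
        rw [if_pos (by omega)]
      have hgb : PySem.List.pyGetD (x :: t) ((j : Nat) : Int) 0 = t.getD (j - 1) 0 := by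
        rw [PySem.List.pyGetD_natCast]
        obtain ⟨j', rfl⟩ : ∃ j', j = j' + 1 := ⟨j - 1, by omega⟩
        simp
      rw [hgp, hgb, PySem.List.pySetD_natCast]
      have hsum : pref t (j - 1) + t.getD (j - 1) 0 = pref t j := by
        rw [List.getD_eq_getElem _ _ (by omega)]
        unfold pref
        have := List.sum_take_succ t (j - 1) (by omega)
        rw [show (j - 1) + 1 = j from by omega] at this
        omega
      rw [hsum]
      apply List.ext_getElem (by simp)
      intro i h1 h2
      simp only [List.getElem_set, List.getElem_map, List.getElem_range]
      split_ifs <;> first | omega | (subst_vars; rfl)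
    · have hj0 : j = 0 := by omega
      subst hj0
      rw [show ((0 + 1 : Nat) : Int) = 1 from by norm_num, PySem.List.pyRange_one_eq_nil le_rfl]
      apply List.ext_getElem (by simp)
      intro i h1 h2
      simp only [List.foldl_nil, List.getElem_replicate, List.getElem_map, List.getElem_range]
      split_ifs with h
      · have : i = 0 := by omega
        subst this
        simp [pref]
      · rfl

-- the triple-sum read off the prefix table
theorem pref_window (t : List Int) (l : Nat) (a b c : Int) (rest : List Int)
    (hd : t.drop l = a :: b :: c :: rest) :
    pref t (l + 3) - pref t l = a + b + c := by
  unfold pref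
  rw [List.take_add, List.sum_append, hd]
  simp [List.take_succ_cons]
  ring

theorem loopA_eq (t : List Int)
    (P : List Int) (hlen : P.length = t.length + 1)
    (hP : ∀ i : Nat, i ≤ t.length → PySem.List.pyGetD P (i : Int) 0 = pref t i) :
    ∀ (k l : Nat), t.length ≤ l + k → ∀ (count : Int),
      solveLoopA P count (l : Int) ((l : Int) + 3) = count + ctr (t.drop l) := by
  intro k
  induction k using Nat.strong_induction_on with
  | _ k ih =>
    intro l hk count
    rw [solveLoopA]
    by_cases hg : (l : Int) + 3 < (P.length : Int)
    · have hg' : l + 2 < t.length := by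
        rw [hlen] at hg
        exact_mod_cast by omega
      have hkk : 3 ≤ k := by omega
      obtain ⟨a, b, c, rest, hd⟩ :
          ∃ a b c rest, t.drop l = a :: b :: c :: rest := by
        match hm : t.drop l with
        | a :: b :: c :: rest => exact ⟨a, b, c, rest, rfl⟩
        | [] | [_] | [_,_] =>
          have := List.length_drop (l := t) (i := l)
          rw [hm] at this
          simp at this
          omega
      have hcond : PySem.List.pyGetD P ((l : Int) + 3) 0 - PySem.List.pyGetD P (l : Int) 0
          = a + b + c := by
        rw [show ((l : Int) + 3) = ((l + 3 : Nat) : Int) from by push_cast; ring]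
        rw [hP (l + 3) (by omega), hP l (by omega)]
        exact pref_window t l a b c rest hd
      have hrest : t.drop (l + 3) = rest := by
        rw [← List.drop_drop, hd]
        rfl
      have hrest1 : t.drop (l + 1) = b :: c :: rest := by
        rw [← List.drop_drop, hd]
        rfl
      rw [dif_pos hg, hcond, hd, ctr]
      by_cases hm : a + b + c = 3
      · rw [if_pos hm, if_pos hm]
        rw [show ((l : Int) + 3 - 1 + 1) = ((l + 3 : Nat) : Int) from by push_cast; ring,
            show ((l : Int) + 3 + 2 + 1) = ((l + 3 : Nat) : Int) + 3 from by push_cast; ring]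
        rw [ih (k - 3) (by omega) (l + 3) (by omega) (count + 1), hrest]
        ring
      · rw [if_neg hm, if_neg hm]
        rw [show ((l : Int) + 1) = ((l + 1 : Nat) : Int) from by push_cast; ring,
            show ((l : Int) + 3 + 1) = ((l + 1 : Nat) : Int) + 3 from by push_cast; ring]
        rw [ih (k - 1) (by omega) (l + 1) (by omega) count, hrest1]
    · rw [dif_neg hg]
      have : (t.drop l).length ≤ 2 := by
        rw [hlen] at hg
        simp only [List.length_drop]
        omega
      rw [ctr_short _ this]
      ring

-- ===== VERDICT (by name: the statement is the Claim_ definition above) =====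
theorem solve_spec : Claim_equal_solve := by
  intro bosses _ hpre
  unfold Spec_solve
  match bosses with
  | [] => exact absurd rfl hpre
  | x :: t =>
    rw [solve_alt_eq]
    show solveLoopA _ (PySem.List.pyGetD (x :: t) 0 0) 0 3 = x + ctr t
    have hfill := prefix_fill x t (t.length + 1) le_rfl (by omega)
    rw [show ((x :: t).length : Int) = ((t.length + 1 : Nat) : Int) from by simp,
        Int.toNat_natCast, hfill]
    have h0 : PySem.List.pyGetD (x :: t) 0 0 = x := by
      simp [PySem.List.pyGetD]
    rw [h0]
    have := loopA_eq t
      ((List.range (t.length + 1)).map (fun i => if i < t.length + 1 then pref t i else 0))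
      (by simp)
      (by
        intro i hi
        rw [PySem.List.pyGetD_natCast, List.getD_eq_getElem _ _ (by simp; omega)]
        simp only [List.getElem_map, List.getElem_range]
        rw [if_pos (by omega)])
      t.length 0 (by omega) x
    simpa using this
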